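-- pv_equiv track=rewrite | github.com/MaxLZp/codewars | tests-python/7_PopShift/test_popshift.py | pop_shift
-- ===== SOURCE A (Python) =====
-- def pop_shift(s):
--     result = ["", "", ""]
--     lst = list(s)
--     while len(lst) > 1 :
--         result[0] += lst[-1]
--         result[1] += lst[0]
--         lst = lst[1:-1]
--     result[2] = ''.join(lst)
--
--     return result
-- ===== SOURCE B (Python) =====
-- def pop_shift(s):
--     n = len(s)
--     h = n // 2
--     p = n % 2
--     return [s[h + p:][::-1], s[:h], s[h:h + p]]
-- ===== Notes on version B (the rewrite author's own statement) =====
-- stated objective: faster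
-- what changed: Replaces the end-peeling while-loop over a shrinking list with a closed-form computation of the three parts by direct slicing (back half reversed, front half, optional middle char).
import Mathlib
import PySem

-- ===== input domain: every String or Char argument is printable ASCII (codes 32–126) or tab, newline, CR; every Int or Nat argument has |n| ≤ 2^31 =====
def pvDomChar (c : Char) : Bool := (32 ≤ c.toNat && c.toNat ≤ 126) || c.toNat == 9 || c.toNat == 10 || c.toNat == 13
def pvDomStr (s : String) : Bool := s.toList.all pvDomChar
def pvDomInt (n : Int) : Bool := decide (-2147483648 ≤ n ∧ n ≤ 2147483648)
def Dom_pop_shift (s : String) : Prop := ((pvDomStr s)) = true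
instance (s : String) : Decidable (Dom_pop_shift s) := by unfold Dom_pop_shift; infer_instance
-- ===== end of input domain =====

-- B replaces A's end-peeling while-loop by closed-form slicing; objective: simpler. Return values only (A mutates nothing observable).

-- ===== PORT A =====
-- The while-loop of A, over the loop state (result[0], result[1], lst) as lists of chars.
-- lst[-1] with len(lst) > 1 is lst.getLast!; lst[0] is lst.take 1 (one element);
-- lst[1:-1] with len(lst) ≥ 2 is exactly lst.tail.dropLast.
def popShiftLoop (l a b : List Char) : List Char × List Char × List Char :=
  if 1 < l.length then
    popShiftLoop l.tail.dropLast (a ++ [l.getLast!]) (b ++ l.take 1)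
  else
    (a, b, l)
termination_by l.length
decreasing_by simp [List.length_dropLast, List.length_tail]; omega

def pop_shift (s : String) : List String :=
  let r := popShiftLoop s.toList [] []
  [String.ofList r.1, String.ofList r.2.1, String.ofList r.2.2]

-- ===== PORT B =====
-- s[h+p:][::-1] = reverse of drop (h+p); s[:h] = take h; s[h:h+p] = (drop h).take p
-- (all slice bounds are nonnegative and clamping matches drop/take exactly).
def pop_shift_alt (s : String) : List String :=
  let cs := s.toList
  let n := cs.length
  let h := n / 2
  let p := n % 2
  [String.ofList ((cs.drop (h + p)).reverse), String.ofList (cs.take h), String.ofList ((cs.drop h).take p)]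

-- ===== PRECONDITION & SPEC =====
def Spec_pop_shift (s : String) (out : List String) : Prop := out = pop_shift_alt s
instance (s : String) (out : List String) : Decidable (Spec_pop_shift s out) := by unfold Spec_pop_shift; infer_instance

-- ===== CLAIM (what is proved, stated in full; the proofs are below) =====
def Claim_equal_pop_shift : Prop := ∀ (s : String), Dom_pop_shift s → Spec_pop_shift s (pop_shift s)

-- ===== LEMMAS AND PROOFS =====

-- Closed form of A's loop: it accumulates the reversed back half, the front half,
-- and leaves the middle character (if the length is odd) as the residual list.
theorem popShiftLoop_eq (l a b : List Char) :
    popShiftLoop l a b =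
      (a ++ (l.drop (l.length / 2 + l.length % 2)).reverse,
       b ++ l.take (l.length / 2),
       (l.drop (l.length / 2)).take (l.length % 2)) := by
  induction l, a, b using popShiftLoop.induct with
  | case1 l a b hl ih =>
    rw [popShiftLoop, if_pos hl, ih]
    -- decompose l = x :: (u ++ [y])
    obtain ⟨x, t, rfl⟩ : ∃ x t, l = x :: t := by
      cases l with
      | nil => simp at hl
      | cons x t => exact ⟨x, t, rfl⟩
    have ht : t ≠ [] := by
      cases t with
      | nil => simp at hl
      | cons _ _ => simp
    obtain ⟨u, y, htu⟩ : ∃ u y, t = u ++ [y] := by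
      rcases List.eq_nil_or_concat t with h | ⟨u, y, h⟩
      · exact absurd h ht
      · exact ⟨u, y, by simpa using h⟩
    subst htu
    have hlast : (x :: (u ++ [y])).getLast! = y := by
      have h0 : (x :: (u ++ [y])).getLast? = some y := List.getLast?_concat (l := x :: u)
      simp [h0]
    have hdl : (x :: (u ++ [y])).tail.dropLast = u := by simp
    rw [hlast, hdl]
    set m := u.length with hm
    have hlen : (x :: (u ++ [y])).length = m + 2 := by simp [hm]
    have h1 : (x :: (u ++ [y])).length / 2 = m / 2 + 1 := by rw [hlen]; omega
    have h2 : (x :: (u ++ [y])).length % 2 = m % 2 := by rw [hlen]; omega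
    rw [h1, h2]
    simp only [Prod.mk.injEq]
    refine ⟨?_, ?_, ?_⟩
    · -- back part
      have hdrop : (x :: (u ++ [y])).drop (m / 2 + 1 + m % 2) = u.drop (m / 2 + m % 2) ++ [y] := by
        have he : (m / 2 + 1 + m % 2) = (m / 2 + m % 2) + 1 := by omega
        rw [he, List.drop_succ_cons, List.drop_append_of_le_length (by omega)]
      rw [hdrop]
      simp
    · -- front part
      have htake : (x :: (u ++ [y])).take (m / 2 + 1) = x :: u.take (m / 2) := by
        rw [List.take_succ_cons, List.take_append_of_le_length (by omega)]
      rw [htake]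
      simp
    · -- middle part
      have hd : (x :: (u ++ [y])).drop (m / 2 + 1) = u.drop (m / 2) ++ [y] := by
        rw [List.drop_succ_cons, List.drop_append_of_le_length (by omega)]
      rw [hd, List.take_append_of_le_length (by simp [List.length_drop]; omega)]
  | case2 l a b hl =>
    rw [popShiftLoop, if_neg hl]
    match l with
    | [] => simp
    | [c] => simp
    | c :: d :: r => exact absurd (by simp) hl

-- ===== VERDICT (by name: the statement is the Claim_ definition above) =====
theorem pop_shift_spec : Claim_equal_pop_shift := by
  intro s _
  show pop_shift s = pop_shift_alt s
  simp [pop_shift, pop_shift_alt, popShiftLoop_eq]
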